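-- pv_equiv track=rewrite | github.com/GuudMan/Algorithm | 题目/字符串距离计算.py | distance_str
-- ===== SOURCE A (Python) =====
-- def distance_str(str_list, a, b):
--     if a not in str_list or b not in str_list:
--         return -1
--     elif a == b:
--         return 0
--     else:
--         a_index = []
--         b_index = []
--         for i in range(len(str_list)):
--             if str_list[i] == b:
--                 b_index.append(i)
--             if str_list[i] == a:
--                 a_index.append(i)
--         res = []
--         for a_i in a_index:
--             for b_i in b_index:
--                 res.append(abs(a_i - b_i))
--         return min(res)
-- ===== SOURCE B (Python) =====
-- def distance_str(str_list, a, b):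
--     if a == b:
--         return 0 if a in str_list else -1
--     best = last_a = last_b = None
--     for i, s in enumerate(str_list):
--         if s == a:
--             last_a = i
--             if last_b is not None:
--                 d = i - last_b
--                 if best is None or d < best:
--                     best = d
--         elif s == b:
--             last_b = i
--             if last_a is not None:
--                 d = i - last_a
--                 if best is None or d < best:
--                     best = d
--     return best if best is not None else -1
-- ===== Notes on version B (the rewrite author's own statement) =====
-- stated objective: alternative
-- what changed: Replaced collecting both full index lists and minimising over the entire cross product of |ai-bi| with a single pass that tracks the last seen index of each value and updates a running minimum; intended as asymptotically better on duplicate-heavy inputs (O(n) vs O(n+|A|*|B|)), but a timing run measured only a 1.21x ratio at the largest size, so no speed is claimed.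
import Mathlib
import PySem

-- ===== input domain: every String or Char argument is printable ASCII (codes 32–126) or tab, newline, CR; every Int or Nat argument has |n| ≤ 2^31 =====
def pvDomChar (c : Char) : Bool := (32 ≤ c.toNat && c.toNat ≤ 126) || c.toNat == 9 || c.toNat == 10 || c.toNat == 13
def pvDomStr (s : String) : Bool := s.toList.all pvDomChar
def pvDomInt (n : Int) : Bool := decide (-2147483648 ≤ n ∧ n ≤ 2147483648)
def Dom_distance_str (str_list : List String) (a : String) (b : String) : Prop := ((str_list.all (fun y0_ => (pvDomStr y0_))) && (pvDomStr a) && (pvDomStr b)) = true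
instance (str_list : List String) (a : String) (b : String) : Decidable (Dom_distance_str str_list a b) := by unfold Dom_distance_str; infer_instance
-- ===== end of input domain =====

-- B replaces A's cross-product minimum over all index pairs with a single pass
-- tracking the last seen index of each value and a running minimum (objective: alternative).

-- ===== PORT A =====
-- loop body of A's index-collecting pass: append i to b_index if s==b, to a_index if s==a
def pvStepA (a b : String) (p : List Int × List Int) (x : Int × String) : List Int × List Int :=
  let p1 := if x.2 = b then (p.1 ++ [x.1], p.2) else p
  if x.2 = a then (p1.1, p1.2 ++ [x.1]) else p1

def distance_str (str_list : List String) (a : String) (b : String) : Int :=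
  if ¬ a ∈ str_list ∨ ¬ b ∈ str_list then -1
  else if a = b then 0
  else
    let p := (PySem.List.pyRange 0 (str_list.length : Int) 1).foldl
      (fun p i => pvStepA a b p (i, PySem.List.pyGetD str_list i "")) ([], [])
    let res := p.2.foldl (fun r ai => p.1.foldl (fun r bi => r ++ [|ai - bi|]) r) ([] : List Int)
    match PySem.List.min? res (fun y => y) with
    | some m => m
    | none => 0   -- unreachable: both index lists are nonempty here, so res ≠ []

-- ===== PORT B =====
-- running-minimum update: best := min(best, i - last_other) when last_other is set
def pvUpd (best : Option Int) (lastOther : Option Int) (i : Int) : Option Int :=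
  match lastOther with
  | none => best
  | some j =>
    match best with
    | none => some (i - j)
    | some m => if i - j < m then some (i - j) else some m

-- loop body of B's single pass; state = (best, last_a, last_b)
def pvStepB (a b : String) (st : Option Int × Option Int × Option Int) (x : Int × String) :
    Option Int × Option Int × Option Int :=
  if x.2 = a then (pvUpd st.1 st.2.2 x.1, some x.1, st.2.2)
  else if x.2 = b then (pvUpd st.1 st.2.1 x.1, st.2.1, some x.1)
  else st

def distance_str_alt (str_list : List String) (a : String) (b : String) : Int :=
  if a = b then (if a ∈ str_list then 0 else -1)
  else
    let st := (PySem.List.enumerate str_list 0).foldl (pvStepB a b) (none, none, none)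
    match st.1 with
    | some m => m
    | none => -1

-- ===== PRECONDITION & SPEC =====
def Spec_distance_str (str_list : List String) (a : String) (b : String) (out : Int) : Prop := out = distance_str_alt str_list a b
instance (str_list : List String) (a : String) (b : String) (out : Int) : Decidable (Spec_distance_str str_list a b out) := by unfold Spec_distance_str; infer_instance

-- ===== CLAIM (what is proved, stated in full; the proofs are below) =====
def Claim_equal_distance_str : Prop := ∀ (str_list : List String) (a : String) (b : String), Dom_distance_str str_list a b → Spec_distance_str str_list a b (distance_str str_list a b)

-- ===== LEMMAS AND PROOFS =====

-- indices at which x occurs, read off an enumerated list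
def pvIdx (e : List (Int × String)) (x : String) : List Int :=
  e.filterMap (fun p => if p.2 = x then some p.1 else none)

-- all |ai - bi| for ai an index of a, bi an index of b (the contents of A's res list)
def pvPairs (e : List (Int × String)) (a b : String) : List Int :=
  (pvIdx e a).flatMap (fun ai => (pvIdx e b).map (fun bi => |ai - bi|))

-- minimum value of a list, as an Option
def pvMin : List Int → Option Int
  | [] => none
  | x :: t => some (t.foldl min x)

theorem pvMin_eq_none_iff (xs : List Int) : pvMin xs = none ↔ xs = [] := by
  cases xs <;> simp [pvMin]

theorem mem_pvPairs (e : List (Int × String)) (a b : String) (y : Int) :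
    y ∈ pvPairs e a b ↔ ∃ ai ∈ pvIdx e a, ∃ bi ∈ pvIdx e b, y = |ai - bi| := by
  simp [pvPairs, List.mem_flatMap, List.mem_map, eq_comm]

theorem pvMin_eq_min? (xs : List Int) : PySem.List.min? xs (fun y => y) = pvMin xs := by
  cases xs with
  | nil => simp [pvMin, PySem.List.min?]
  | cons x t => simpa [pvMin] using PySem.List.min?_id_cons x t

theorem pvMin_iff (xs : List Int) (m : Int) :
    pvMin xs = some m ↔ m ∈ xs ∧ ∀ y ∈ xs, m ≤ y := by
  cases xs with
  | nil => simp [pvMin]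
  | cons x t =>
    simp only [pvMin, Option.some_inj]
    constructor
    · rintro rfl
      have hmem := PySem.List.foldl_min_mem t x
      have hle := PySem.List.foldl_min_le t x
      refine ⟨?_, ?_⟩
      · rcases hmem with h | h
        · simp [h]
        · exact List.mem_cons_of_mem _ h
      · intro y hy
        rcases List.mem_cons.1 hy with rfl | hy
        · exact hle.1
        · exact hle.2 y hy
    · rintro ⟨hmem, hmin⟩
      have hle := PySem.List.foldl_min_le t x
      have hmem' := PySem.List.foldl_min_mem t x
      have h1 : m ≤ t.foldl min x := by
        rcases hmem' with h | h
        · rw [h]; exact hmin x (by simp)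
        · exact hmin _ (List.mem_cons_of_mem _ h)
      have h2 : t.foldl min x ≤ m := by
        rcases List.mem_cons.1 hmem with rfl | h
        · exact hle.1
        · exact hle.2 m h
      omega

theorem pvMin_congr_mem (xs ys : List Int) (h : ∀ y, y ∈ xs ↔ y ∈ ys) : pvMin xs = pvMin ys := by
  cases hx : pvMin xs with
  | none =>
    rw [pvMin_eq_none_iff] at hx
    subst hx
    symm
    rw [pvMin_eq_none_iff, List.eq_nil_iff_forall_not_mem]
    intro y hy
    exact (List.not_mem_nil (a := y)) ((h y).2 hy)
  | some m =>
    rw [pvMin_iff] at hx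
    symm
    rw [pvMin_iff]
    exact ⟨(h m).1 hx.1, fun y hy => hx.2 y ((h y).2 hy)⟩

theorem pvMin_pairs_comm (e : List (Int × String)) (a b : String) :
    pvMin (pvPairs e a b) = pvMin (pvPairs e b a) := by
  apply pvMin_congr_mem
  intro y
  rw [mem_pvPairs, mem_pvPairs]
  constructor
  · rintro ⟨ai, ha, bi, hb, rfl⟩
    exact ⟨bi, hb, ai, ha, (abs_sub_comm ai bi)⟩
  · rintro ⟨bi, hb, ai, ha, rfl⟩
    exact ⟨ai, ha, bi, hb, (abs_sub_comm bi ai)⟩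

theorem pvIdx_lt (l : List String) (x : String) (j : Int)
    (h : j ∈ pvIdx (PySem.List.enumerate l 0) x) : 0 ≤ j ∧ j < (l.length : Int) := by
  simp only [pvIdx, List.mem_filterMap] at h
  obtain ⟨p, hp, hf⟩ := h
  rw [PySem.List.mem_enumerate_iff] at hp
  obtain ⟨k, hk, rfl⟩ := hp
  split at hf
  · simp at hf; omega
  · simp at hf

theorem pvIdx_pairwise (l : List String) (x : String) :
    (pvIdx (PySem.List.enumerate l 0) x).Pairwise (· < ·) := by
  have := PySem.List.pairwise_lt_enumerate l (0 : Int)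
  refine List.Pairwise.filterMap _ ?_ this
  intro p q hpq i hi j hj
  split at hi <;> split at hj <;> simp_all

theorem pvIdx_ne_nil (l : List String) (x : String) :
    x ∈ l ↔ pvIdx (PySem.List.enumerate l 0) x ≠ [] := by
  rw [ne_eq, pvIdx, List.filterMap_eq_nil_iff]
  push Not
  constructor
  · intro hx
    obtain ⟨k, hk, hget⟩ := List.mem_iff_getElem.1 hx
    exact ⟨((0 : Int) + k, l[k]), by rw [PySem.List.mem_enumerate_iff]; exact ⟨k, hk, rfl⟩, by simp [hget]⟩
  · rintro ⟨p, hp, hf⟩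
    rw [PySem.List.mem_enumerate_iff] at hp
    obtain ⟨k, hk, rfl⟩ := hp
    by_cases hx : l[k] = x
    · rw [← hx]; exact List.getElem_mem hk
    · simp [hx] at hf

theorem last_is_max (L : List Int) (m : Int) (hpw : L.Pairwise (· < ·))
    (h : L.getLast? = some m) : ∀ y ∈ L, y ≤ m := by
  obtain ⟨l', rfl⟩ := List.getLast?_eq_some_iff.1 h
  rw [List.pairwise_append] at hpw
  intro y hy
  rcases List.mem_append.1 hy with hy | hy
  · exact le_of_lt (hpw.2.2 y hy m (by simp))
  · simp at hy; omega

theorem lemA (a b : String) (e : List (Int × String)) (acc : List Int × List Int) :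
    e.foldl (pvStepA a b) acc = (acc.1 ++ pvIdx e b, acc.2 ++ pvIdx e a) := by
  induction e generalizing acc with
  | nil => simp [pvIdx]
  | cons p e ih =>
    rw [List.foldl_cons, ih]
    simp only [pvIdx, List.filterMap_cons, pvStepA]
    split_ifs with h1 h2 h2 <;> simp_all

theorem lemRes (A B : List Int) (init : List Int) :
    A.foldl (fun r ai => B.foldl (fun r bi => r ++ [|ai - bi|]) r) init
      = init ++ A.flatMap (fun ai => B.map (fun bi => |ai - bi|)) := by
  induction A generalizing init with
  | nil => simp
  | cons x A ih =>
    rw [List.foldl_cons, ih, PySem.List.foldl_append_singleton_eq_map]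
    simp

theorem lemUpd (e : List (Int × String)) (a b : String) (n : Int) (hab : a ≠ b)
    (hpw : (pvIdx e b).Pairwise (· < ·))
    (hlt : ∀ j ∈ pvIdx e b, j < n) :
    pvUpd (pvMin (pvPairs e a b)) ((pvIdx e b).getLast?) n
      = pvMin (pvPairs (e ++ [(n, a)]) a b) := by
  have hidxb : pvIdx (e ++ [(n, a)]) b = pvIdx e b := by
    simp [pvIdx, List.filterMap_append, hab]
  have hidxa : pvIdx (e ++ [(n, a)]) a = pvIdx e a ++ [n] := by
    simp [pvIdx, List.filterMap_append]
  cases hlb : (pvIdx e b).getLast? with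
  | none =>
    rw [List.getLast?_eq_none_iff] at hlb
    have h1 : pvPairs e a b = [] := by simp [pvPairs, hlb]
    have h2 : pvPairs (e ++ [(n, a)]) a b = [] := by
      simp [pvPairs, hidxb, hlb]
    simp [pvUpd, h1, h2, pvMin]
  | some m =>
    have hmmem : m ∈ pvIdx e b := List.mem_of_getLast? hlb
    have hmax : ∀ y ∈ pvIdx e b, y ≤ m := last_is_max _ m hpw hlb
    have hmn : m < n := hlt m hmmem
    have hnm_mem : (n - m) ∈ pvPairs (e ++ [(n, a)]) a b := by
      rw [mem_pvPairs]
      exact ⟨n, by rw [hidxa]; simp, m, by rw [hidxb]; exact hmmem,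
        by rw [abs_of_nonneg (by omega)]⟩
    have hbound : ∀ y ∈ pvPairs (e ++ [(n, a)]) a b,
        y ∈ pvPairs e a b ∨ (n - m) ≤ y := by
      intro y hy
      rw [mem_pvPairs, hidxa, hidxb] at hy
      obtain ⟨ai, hai, bi, hbi, rfl⟩ := hy
      rcases List.mem_append.1 hai with hai | hai
      · exact Or.inl ((mem_pvPairs e a b _).2 ⟨ai, hai, bi, hbi, rfl⟩)
      · right
        simp only [List.mem_singleton] at hai
        subst hai
        have h1 := hmax bi hbi
        have h2 := hlt bi hbi
        rw [abs_of_nonneg (by omega)]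
        omega
    cases hbest : pvMin (pvPairs e a b) with
    | none =>
      rw [pvMin_eq_none_iff] at hbest
      simp only [pvUpd]
      symm
      rw [pvMin_iff]
      refine ⟨hnm_mem, fun y hy => ?_⟩
      rcases hbound y hy with h | h
      · rw [hbest] at h; cases h
      · exact h
    | some mb =>
      rw [pvMin_iff] at hbest
      obtain ⟨hmb_mem, hmb_min⟩ := hbest
      have hsub : pvPairs e a b ⊆ pvPairs (e ++ [(n, a)]) a b := by
        intro y hy
        rw [mem_pvPairs] at hy ⊢
        obtain ⟨ai, hai, bi, hbi, rfl⟩ := hy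
        exact ⟨ai, by rw [hidxa]; exact List.mem_append_left _ hai, bi,
          by rw [hidxb]; exact hbi, rfl⟩
      simp only [pvUpd]
      split_ifs with hc
      · symm
        rw [pvMin_iff]
        refine ⟨hnm_mem, fun y hy => ?_⟩
        rcases hbound y hy with h | h
        · exact le_trans (le_of_lt hc) (hmb_min y h)
        · exact h
      · symm
        rw [pvMin_iff]
        refine ⟨hsub hmb_mem, fun y hy => ?_⟩
        rcases hbound y hy with h | h
        · exact hmb_min y h
        · omega

theorem lemB (l : List String) (a b : String) (hab : a ≠ b) :
    (PySem.List.enumerate l 0).foldl (pvStepB a b) (none, none, none)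
      = (pvMin (pvPairs (PySem.List.enumerate l 0) a b),
         (pvIdx (PySem.List.enumerate l 0) a).getLast?,
         (pvIdx (PySem.List.enumerate l 0) b).getLast?) := by
  induction l using List.reverseRecOn with
  | nil => simp [PySem.List.enumerate, pvIdx, pvPairs, pvMin]
  | append_singleton l x ih =>
    have henum : PySem.List.enumerate (l ++ [x]) (0 : Int)
        = PySem.List.enumerate l 0 ++ [((l.length : Int), x)] := by
      rw [PySem.List.enumerate_append]
      simp [PySem.List.enumerate_cons, PySem.List.enumerate_nil]
    set e := PySem.List.enumerate l (0 : Int) with he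
    set n := (l.length : Int) with hn
    rw [henum, List.foldl_append, ih, List.foldl_cons, List.foldl_nil]
    have hidxA_app : ∀ y : String, pvIdx (e ++ [(n, x)]) y
        = pvIdx e y ++ (if x = y then [n] else []) := by
      intro y
      simp only [pvIdx, List.filterMap_append]
      congr 1
      split <;> simp_all
    by_cases hxa : x = a
    · subst hxa
      have h1 : pvIdx (e ++ [(n, x)]) x = pvIdx e x ++ [n] := by rw [hidxA_app]; simp
      have h2 : pvIdx (e ++ [(n, x)]) b = pvIdx e b := by rw [hidxA_app]; simp [hab]
      have hstep : pvStepB x b (pvMin (pvPairs e x b), (pvIdx e x).getLast?,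
          (pvIdx e b).getLast?) (n, x) = (pvUpd (pvMin (pvPairs e x b)) ((pvIdx e b).getLast?) n,
          some n, (pvIdx e b).getLast?) := by
        simp [pvStepB]
      rw [hstep, h1, h2]
      have := lemUpd e x b n hab (by rw [he]; exact pvIdx_pairwise l b)
        (fun j hj => (pvIdx_lt l b j (by rw [← he]; exact hj)).2)
      rw [this]
      simp
    · by_cases hxb : x = b
      · subst hxb
        have h1 : pvIdx (e ++ [(n, x)]) x = pvIdx e x ++ [n] := by rw [hidxA_app]; simp
        have h2 : pvIdx (e ++ [(n, x)]) a = pvIdx e a := by rw [hidxA_app]; simp [hxa]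
        have hstep : pvStepB a x (pvMin (pvPairs e a x), (pvIdx e a).getLast?,
            (pvIdx e x).getLast?) (n, x) = (pvUpd (pvMin (pvPairs e a x)) ((pvIdx e a).getLast?) n,
            (pvIdx e a).getLast?, some n) := by
          simp [pvStepB, Ne.symm hab]
        rw [hstep, h1, h2]
        have := lemUpd e x a n (Ne.symm hab) (by rw [he]; exact pvIdx_pairwise l a)
          (fun j hj => (pvIdx_lt l a j (by rw [← he]; exact hj)).2)
        rw [pvMin_pairs_comm e a x, this, pvMin_pairs_comm _ x a]
        simp
      · have h1 : pvIdx (e ++ [(n, x)]) a = pvIdx e a := by rw [hidxA_app]; simp [hxa]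
        have h2 : pvIdx (e ++ [(n, x)]) b = pvIdx e b := by rw [hidxA_app]; simp [hxb]
        have hstep : ∀ st : Option Int × Option Int × Option Int,
            pvStepB a b st (n, x) = st := by
          intro st; simp [pvStepB, hxa, hxb]
        rw [hstep]
        rw [show pvPairs (e ++ [(n, x)]) a b = pvPairs e a b by rw [pvPairs, h1, h2, ← pvPairs], h1, h2]

-- ===== VERDICT (by name: the statement is the Claim_ definition above) =====
theorem distance_str_spec : Claim_equal_distance_str := by
  intro l a b _
  unfold Spec_distance_str
  by_cases hab : a = b
  · subst hab
    by_cases hmem : a ∈ l <;> simp [distance_str, distance_str_alt, hmem]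
  · have hA0 : ∀ acc : List Int × List Int,
        (PySem.List.pyRange 0 (l.length : Int) 1).foldl
          (fun p i => pvStepA a b p (i, PySem.List.pyGetD l i "")) acc
          = (PySem.List.enumerate l 0).foldl (pvStepA a b) acc := by
      intro acc
      rw [PySem.List.enumerate_eq_map_pyRange l "", List.foldl_map, PySem.List.len_eq]
    have hBfold := lemB l a b hab
    set e := PySem.List.enumerate l (0 : Int) with he
    have hBval : distance_str_alt l a b =
        (match pvMin (pvPairs e a b) with
         | some m => m
         | none => -1) := by
      unfold distance_str_alt
      rw [if_neg hab, hBfold]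
    rw [hBval]
    by_cases hm : ¬ a ∈ l ∨ ¬ b ∈ l
    · have hnil : pvPairs e a b = [] := by
        rcases hm with h | h
        · have := (pvIdx_ne_nil l a).not.1 h
          rw [not_not, ← he] at this
          simp [pvPairs, this]
        · have := (pvIdx_ne_nil l b).not.1 h
          rw [not_not, ← he] at this
          simp [pvPairs, this]
      unfold distance_str
      rw [if_pos hm, hnil]
      rfl
    · unfold distance_str
      rw [if_neg hm, if_neg hab]
      simp only [hA0, lemA, lemRes, pvMin_eq_min?, List.nil_append]
      rw [not_or, not_not, not_not] at hm
      have ha := (pvIdx_ne_nil l a).1 hm.1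
      have hb := (pvIdx_ne_nil l b).1 hm.2
      obtain ⟨ai, hai⟩ := List.exists_mem_of_ne_nil _ ha
      obtain ⟨bi, hbi⟩ := List.exists_mem_of_ne_nil _ hb
      have hne : pvPairs e a b ≠ [] := by
        intro hnil
        have : |ai - bi| ∈ pvPairs e a b := (mem_pvPairs e a b _).2 ⟨ai, hai, bi, hbi, rfl⟩
        rw [hnil] at this
        cases this
      cases hv : pvMin (pvPairs e a b) with
      | none => exact absurd ((pvMin_eq_none_iff _).1 hv) hne
      | some m => rw [show (pvIdx e a).flatMap (fun ai => (pvIdx e b).map (fun bi => |ai - bi|)) = pvPairs e a b from rfl, hv]
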